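-- pv_equiv track=rewrite | github.com/aarush-luthra/Government-Scheme | backend/app.py | extract_scheme_name
-- ===== SOURCE A (Python) =====
-- def extract_scheme_name(message: str) -> str:
--     """
--     Extract the scheme name from a detail request message.
--     E.g., "tell me more about Feed The Seed" -> "Feed The Seed"
--     """
--     msg_lower = message.lower()
--
--     # List of patterns to remove (keeping what comes after)
--     patterns_to_remove = [
--         "tell me more about the ", "tell me more about ",
--         "tell me about the ", "tell me about ",
--         "more about the ", "more about ",
--         "details about the ", "details about ",
--         "details of the ", "details of ",
--         "more info on the ", "more info on ",
--         "more information about the ", "more information about ",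
--         "explain the ", "explain ",
--         "what is the ", "what is ",
--         "describe the ", "describe ",
--         "elaborate on the ", "elaborate on ",
--         "info about the ", "info about ",
--         "information on the ", "information on "
--     ]
--
--     result = message
--     matched_pattern = False
--     for pattern in patterns_to_remove:
--         if msg_lower.startswith(pattern):
--             result = message[len(pattern):]
--             matched_pattern = True
--             break
--
--     # If no intro pattern matched, but it was detected as scheme detail,
--     # assume the whole message is likely the scheme name (or close to it)
--     if not matched_pattern:
--         result = message
--
--     # Clean up trailing words like "scheme", "yojana" ONLY if they are at the very end and likely part of a question
--     # But usually scheme names contain these words, so be careful.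
--     # Just trim whitespace and punctuation.
--     result = result.strip().strip("?.!,")
--
--     return result
-- ===== SOURCE B (Python) =====
-- def extract_scheme_name(message: str) -> str:
--     """
--     Extract the scheme name from a detail request message.
--     E.g., "tell me more about Feed The Seed" -> "Feed The Seed"
--     """
--     # Longest-match rule: collect every intro phrase that prefixes the message
--     # and strip the longest one; order of the table no longer matters.
--     patterns_to_remove = [
--         "tell me more about the ", "tell me more about ",
--         "tell me about the ", "tell me about ",
--         "more about the ", "more about ",
--         "details about the ", "details about ",
--         "details of the ", "details of ",
--         "more info on the ", "more info on ",
--         "more information about the ", "more information about ",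
--         "explain the ", "explain ",
--         "what is the ", "what is ",
--         "describe the ", "describe ",
--         "elaborate on the ", "elaborate on ",
--         "info about the ", "info about ",
--         "information on the ", "information on "
--     ]
--     low = message.lower()
--     matches = [p for p in patterns_to_remove if low.startswith(p)]
--     if matches:
--         result = message[len(max(matches, key=len)):]
--     else:
--         result = message
--     return result.strip().strip("?.!,")
-- ===== Notes on version B (the rewrite author's own statement) =====
-- stated objective: alternative
-- what changed: Replaces A's order-dependent first-match break scan with an order-independent longest-match rule: collect all matching intro phrases and strip the longest; equivalent because any two phrases matching the same message are prefix-related and A lists the longer variant first.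
import Mathlib
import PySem

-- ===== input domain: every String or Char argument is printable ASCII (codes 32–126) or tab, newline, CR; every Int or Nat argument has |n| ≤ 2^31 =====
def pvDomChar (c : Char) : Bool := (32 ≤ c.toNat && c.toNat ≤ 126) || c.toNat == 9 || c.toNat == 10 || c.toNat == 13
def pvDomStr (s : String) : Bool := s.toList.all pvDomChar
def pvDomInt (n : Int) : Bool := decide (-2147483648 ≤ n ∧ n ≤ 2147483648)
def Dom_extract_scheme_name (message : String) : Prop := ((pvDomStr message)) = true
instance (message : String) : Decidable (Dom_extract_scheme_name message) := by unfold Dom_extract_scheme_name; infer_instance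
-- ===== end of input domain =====

-- B replaces A's order-dependent first-match break scan by an order-independent
-- longest-match rule: collect all matching intro phrases and strip the longest.

-- ===== PORT A =====
def pvPatternsA : List String :=
  ["tell me more about the ", "tell me more about ",
   "tell me about the ", "tell me about ",
   "more about the ", "more about ",
   "details about the ", "details about ",
   "details of the ", "details of ",
   "more info on the ", "more info on ",
   "more information about the ", "more information about ",
   "explain the ", "explain ",
   "what is the ", "what is ",
   "describe the ", "describe ",
   "elaborate on the ", "elaborate on ",
   "info about the ", "info about ",
   "information on the ", "information on "]

-- the for-loop with break: first pattern that cands wins, else result stays message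
def pvScanA (message low : String) : List String → String
  | [] => message
  | p :: ps =>
    if PySem.Str.startswith low p = true then
      PySem.Str.slice message (some (PySem.Str.len p)) none
    else pvScanA message low ps

def extract_scheme_name (message : String) : String :=
  let msg_lower := PySem.Str.lower message
  let result := pvScanA message msg_lower pvPatternsA
  PySem.Str.stripChars (PySem.Str.strip result) "?.!,"

-- ===== PORT B =====
def pvPatternsB : List String :=
  ["tell me more about the ", "tell me more about ",
   "tell me about the ", "tell me about ",
   "more about the ", "more about ",
   "details about the ", "details about ",
   "details of the ", "details of ",
   "more info on the ", "more info on ",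
   "more information about the ", "more information about ",
   "explain the ", "explain ",
   "what is the ", "what is ",
   "describe the ", "describe ",
   "elaborate on the ", "elaborate on ",
   "info about the ", "info about ",
   "information on the ", "information on "]

def extract_scheme_name_alt (message : String) : String :=
  let low := PySem.Str.lower message
  let cands := pvPatternsB.filter (fun p => PySem.Str.startswith low p)
  let result :=
    match PySem.List.max? cands (fun p => PySem.Str.len p) with
    | some m => PySem.Str.slice message (some (PySem.Str.len m)) none
    | none => message
  PySem.Str.stripChars (PySem.Str.strip result) "?.!,"

-- ===== PRECONDITION & SPEC =====
def Spec_extract_scheme_name (message : String) (out : String) : Prop := out = extract_scheme_name_alt message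
instance (message : String) (out : String) : Decidable (Spec_extract_scheme_name message out) := by unfold Spec_extract_scheme_name; infer_instance

-- ===== CLAIM (what is proved, stated in full; the proofs are below) =====
def Claim_equal_extract_scheme_name : Prop := ∀ (message : String), Dom_extract_scheme_name message → Spec_extract_scheme_name message (extract_scheme_name message)

-- ===== LEMMAS AND PROOFS =====

lemma pvSw_iff (s p : String) : PySem.Str.startswith s p = true ↔ p.toList <+: s.toList := by
  rw [← PySem.Chars.startswith_iff]; simp

lemma pvLen_eq (s : String) : PySem.Str.len s = (s.toList.length : Int) := by simp

-- A's loop returns the FIRST matching pattern (else the message): it is the head of the filter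
lemma pvScanA_eq_filter (message low : String) (L : List String) :
    pvScanA message low L =
      match L.filter (fun p => PySem.Str.startswith low p) with
      | [] => message
      | p :: _ => PySem.Str.slice message (some (PySem.Str.len p)) none := by
  induction L with
  | nil => rfl
  | cons p ps ih =>
    simp only [pvScanA, List.filter_cons]
    by_cases h : PySem.Str.startswith low p = true
    · rw [if_pos h, if_pos h]
    · rw [if_neg h, if_neg h, ih]

-- a fold that fixes its accumulator on every element of the list leaves it unchanged
lemma pvFoldlConst {α β : Type} (f : β → α → β) (b : β) (t : List α)
    (h : ∀ x ∈ t, f b x = b) : t.foldl f b = b := by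
  induction t with
  | nil => rfl
  | cons q t ih =>
    rw [List.foldl_cons, h q (by simp)]
    exact ih (fun x hx => h x (by simp [hx]))

-- max(·, key=len) keeps the head when no later length is strictly greater
lemma pvMaxHead (m : String) (t : List String)
    (h : ∀ q ∈ t, PySem.Str.len q ≤ PySem.Str.len m) :
    PySem.List.max? (m :: t) (fun p => PySem.Str.len p) = some m := by
  show List.foldl _ (some m) t = some m
  apply pvFoldlConst
  intro x hx
  show (if PySem.Str.len m < PySem.Str.len x then some x else some m) = some m
  rw [if_neg (by have := h x hx; omega)]

-- among A's 26 patterns, no earlier one is a prefix of a later one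
lemma pvPairwise : pvPatternsA.Pairwise (fun p q => ¬ p.toList <+: q.toList) := by
  decide

lemma pvPatternsB_eq : pvPatternsB = pvPatternsA := rfl

-- ===== VERDICT (by name: the statement is the Claim_ definition above) =====
theorem extract_scheme_name_spec : Claim_equal_extract_scheme_name := by
  intro message _
  unfold Spec_extract_scheme_name extract_scheme_name extract_scheme_name_alt
  show PySem.Str.stripChars (PySem.Str.strip (pvScanA message (PySem.Str.lower message) pvPatternsA)) "?.!,"
      = PySem.Str.stripChars (PySem.Str.strip
          (match PySem.List.max?
              (pvPatternsB.filter (fun p => PySem.Str.startswith (PySem.Str.lower message) p))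
              (fun p => PySem.Str.len p) with
           | some m => PySem.Str.slice message (some (PySem.Str.len m)) none
           | none => message)) "?.!,"
  rw [pvPatternsB_eq, pvScanA_eq_filter]
  set low := PySem.Str.lower message with hlow
  set f := (fun p => PySem.Str.startswith low p) with hf
  cases hfil : pvPatternsA.filter f with
  | nil => simp [PySem.List.max?]
  | cons p rest =>
    have hpw : (p :: rest).Pairwise (fun p q => ¬ p.toList <+: q.toList) := by
      rw [← hfil]
      exact pvPairwise.sublist List.filter_sublist
    have hmax : PySem.List.max? (p :: rest) (fun p => PySem.Str.len p) = some p := by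
      apply pvMaxHead
      intro q hq
      have hpmem : p ∈ pvPatternsA.filter f := by rw [hfil]; exact List.mem_cons_self
      have hqmem : q ∈ pvPatternsA.filter f := by rw [hfil]; exact List.mem_cons_of_mem _ hq
      have hpm : p.toList <+: low.toList := (pvSw_iff _ _).mp (List.of_mem_filter hpmem)
      have hqm : q.toList <+: low.toList := (pvSw_iff _ _).mp (List.of_mem_filter hqmem)
      have hnp : ¬ p.toList <+: q.toList := (List.pairwise_cons.mp hpw).1 q hq
      have hqp : q.toList <+: p.toList := by
        rcases List.prefix_or_prefix_of_prefix hpm hqm with h | h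
        · exact absurd h hnp
        · exact h
      have := hqp.length_le
      rw [pvLen_eq, pvLen_eq]
      omega
    rw [hmax]
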